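-- pv_equiv track=rewrite | github.com/gabrielsecco22/factorio_blueprints | tools/render_blueprint.py | _categorise_counts
-- ===== SOURCE A (Python) =====
-- def _categorise_counts(counts: dict[str, int]) -> dict[str, int]:
--     cats: dict[str, int] = {}
--     def bump(cat: str, n: int) -> None:
--         cats[cat] = cats.get(cat, 0) + n
--     for name, n in counts.items():
--         if "transport-belt" in name or "underground-belt" in name or "splitter" in name or "inserter" in name or "loader" in name:
--             bump("logistics", n)
--         elif "furnace" in name or "assembling-machine" in name or "foundry" in name or "chemical-plant" in name or "oil-refinery" in name or "recycler" in name or "electromagnetic-plant" in name or "biochamber" in name or "centrifuge" in name or "crusher" in name: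
--             bump("crafting", n)
--         elif "mining-drill" in name:
--             bump("extraction", n)
--         elif "electric-pole" in name or name == "substation":
--             bump("power_distribution", n)
--         elif "solar-panel" in name or "accumulator" in name or "steam-engine" in name or "steam-turbine" in name or "boiler" in name or "nuclear-reactor" in name or "heat-exchanger" in name or "heat-pipe" in name:
--             bump("power_generation", n)
--         elif "pipe" in name or "tank" in name or "pump" in name:
--             bump("fluid", n)
--         elif "chest" in name or "container" in name or "warehouse" in name:
--             bump("storage", n)
--         elif "beacon" in name:
--             bump("module_distribution", n)
--         elif "turret" in name or "wall" in name or "gate" in name: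
--             bump("defense", n)
--         else:
--             bump("other", n)
--     return dict(sorted(cats.items()))
-- ===== SOURCE B (Python) =====
-- # Staged sieve: instead of classifying each entry through the cascade and
-- # accumulating a dict, process one CATEGORY at a time — bulk-filter the
-- # still-unclassified entries for that category, sum them in one go, and keep
-- # only the non-matching remainder for the later stages; leftovers are "other".
-- def _categorise_counts(counts: dict[str, int]) -> dict[str, int]:
--     def matcher(subs, exacts=()):
--         return lambda name: any(s in name for s in subs) or name in exacts
--
--     stages = [
--         ("logistics", matcher(("transport-belt", "underground-belt", "splitter", "inserter", "loader"))),
--         ("crafting", matcher(("furnace", "assembling-machine", "foundry", "chemical-plant", "oil-refinery", "recycler", "electromagnetic-plant", "biochamber", "centrifuge", "crusher"))),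
--         ("extraction", matcher(("mining-drill",))),
--         ("power_distribution", matcher(("electric-pole",), ("substation",))),
--         ("power_generation", matcher(("solar-panel", "accumulator", "steam-engine", "steam-turbine", "boiler", "nuclear-reactor", "heat-exchanger", "heat-pipe"))),
--         ("fluid", matcher(("pipe", "tank", "pump"))),
--         ("storage", matcher(("chest", "container", "warehouse"))),
--         ("module_distribution", matcher(("beacon",))),
--         ("defense", matcher(("turret", "wall", "gate"))),
--     ]
--
--     remaining = list(counts.items())
--     cats: dict[str, int] = {}
--     for cat, match in stages:
--         matched = [(nm, n) for nm, n in remaining if match(nm)]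
--         if matched:
--             cats[cat] = sum(n for _, n in matched)
--         remaining = [(nm, n) for nm, n in remaining if not match(nm)]
--     if remaining:
--         cats["other"] = sum(n for _, n in remaining)
--     return dict(sorted(cats.items()))
-- ===== Notes on version B (the rewrite author's own statement) =====
-- stated objective: alternative
-- what changed: A classifies each entry through the nine-branch cascade and accumulates a dict incrementally; B instead runs one bulk pass per category over the shrinking list of unclassified entries (filter + sum per stage), assigning leftovers to 'other' at the end.
import Mathlib
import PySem

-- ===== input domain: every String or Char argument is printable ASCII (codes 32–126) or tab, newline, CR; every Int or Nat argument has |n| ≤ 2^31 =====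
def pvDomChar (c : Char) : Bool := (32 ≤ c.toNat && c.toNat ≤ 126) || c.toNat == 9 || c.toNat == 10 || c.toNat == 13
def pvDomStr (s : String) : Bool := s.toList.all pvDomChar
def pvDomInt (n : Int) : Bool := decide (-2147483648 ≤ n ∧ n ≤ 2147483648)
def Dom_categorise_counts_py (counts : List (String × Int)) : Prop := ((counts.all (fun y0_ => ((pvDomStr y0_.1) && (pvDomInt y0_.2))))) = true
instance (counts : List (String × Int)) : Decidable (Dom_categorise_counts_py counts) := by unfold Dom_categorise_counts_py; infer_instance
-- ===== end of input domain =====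

-- B replaces A's per-entry cascade + incremental dict by a staged sieve: one bulk
-- filter+sum pass per category over the shrinking remainder (alternative, same cost).

-- ===== PORT A =====
def pvBumpA (cats : PySem.Dict String Int) (cat : String) (n : Int) : PySem.Dict String Int :=
  cats.insert cat (cats.getD cat 0 + n)

def pvStepA (cats : PySem.Dict String Int) (p : String × Int) : PySem.Dict String Int :=
  let name := p.1
  let n := p.2
  if PySem.Str.isIn "transport-belt" name || PySem.Str.isIn "underground-belt" name || PySem.Str.isIn "splitter" name || PySem.Str.isIn "inserter" name || PySem.Str.isIn "loader" name then
    pvBumpA cats "logistics" n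
  else if PySem.Str.isIn "furnace" name || PySem.Str.isIn "assembling-machine" name || PySem.Str.isIn "foundry" name || PySem.Str.isIn "chemical-plant" name || PySem.Str.isIn "oil-refinery" name || PySem.Str.isIn "recycler" name || PySem.Str.isIn "electromagnetic-plant" name || PySem.Str.isIn "biochamber" name || PySem.Str.isIn "centrifuge" name || PySem.Str.isIn "crusher" name then
    pvBumpA cats "crafting" n
  else if PySem.Str.isIn "mining-drill" name then
    pvBumpA cats "extraction" n
  else if PySem.Str.isIn "electric-pole" name || name == "substation" then
    pvBumpA cats "power_distribution" n
  else if PySem.Str.isIn "solar-panel" name || PySem.Str.isIn "accumulator" name || PySem.Str.isIn "steam-engine" name || PySem.Str.isIn "steam-turbine" name || PySem.Str.isIn "boiler" name || PySem.Str.isIn "nuclear-reactor" name || PySem.Str.isIn "heat-exchanger" name || PySem.Str.isIn "heat-pipe" name then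
    pvBumpA cats "power_generation" n
  else if PySem.Str.isIn "pipe" name || PySem.Str.isIn "tank" name || PySem.Str.isIn "pump" name then
    pvBumpA cats "fluid" n
  else if PySem.Str.isIn "chest" name || PySem.Str.isIn "container" name || PySem.Str.isIn "warehouse" name then
    pvBumpA cats "storage" n
  else if PySem.Str.isIn "beacon" name then
    pvBumpA cats "module_distribution" n
  else if PySem.Str.isIn "turret" name || PySem.Str.isIn "wall" name || PySem.Str.isIn "gate" name then
    pvBumpA cats "defense" n
  else
    pvBumpA cats "other" n

def categorise_counts_py (counts : List (String × Int)) : List (String × Int) :=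
  (PySem.Dict.ofList (PySem.List.sorted (counts.foldl pvStepA PySem.Dict.empty).items (fun p => toLex (p.1.toList, p.2)) false)).items

-- ===== PORT B =====
-- def matcher(subs, exacts=()): return lambda name: any(s in name for s in subs) or name in exacts
def pvMatcher (subs : List String) (exacts : List String) : String → Bool :=
  fun name => subs.any (fun s => PySem.Str.isIn s name) || exacts.contains name

def pvStages : List (String × (String → Bool)) :=
  [("logistics", pvMatcher ["transport-belt", "underground-belt", "splitter", "inserter", "loader"] []),
   ("crafting", pvMatcher ["furnace", "assembling-machine", "foundry", "chemical-plant", "oil-refinery", "recycler", "electromagnetic-plant", "biochamber", "centrifuge", "crusher"] []),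
   ("extraction", pvMatcher ["mining-drill"] []),
   ("power_distribution", pvMatcher ["electric-pole"] ["substation"]),
   ("power_generation", pvMatcher ["solar-panel", "accumulator", "steam-engine", "steam-turbine", "boiler", "nuclear-reactor", "heat-exchanger", "heat-pipe"] []),
   ("fluid", pvMatcher ["pipe", "tank", "pump"] []),
   ("storage", pvMatcher ["chest", "container", "warehouse"] []),
   ("module_distribution", pvMatcher ["beacon"] []),
   ("defense", pvMatcher ["turret", "wall", "gate"] [])]

-- one loop iteration of B: filter the matched entries out, sum them into their category
def pvStageStep (st : PySem.Dict String Int × List (String × Int)) (r : String × (String → Bool)) :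
    PySem.Dict String Int × List (String × Int) :=
  let matched := st.2.filter (fun e => r.2 e.1)
  let cats := if matched ≠ [] then st.1.insert r.1 ((matched.map Prod.snd).sum) else st.1
  (cats, st.2.filter (fun e => !(r.2 e.1)))

def categorise_counts_py_alt (counts : List (String × Int)) : List (String × Int) :=
  let st := pvStages.foldl pvStageStep (PySem.Dict.empty, counts)
  let cats := if st.2 ≠ [] then st.1.insert "other" ((st.2.map Prod.snd).sum) else st.1
  (PySem.Dict.ofList (PySem.List.sorted cats.items (fun p => toLex (p.1.toList, p.2)) false)).items

-- ===== PRECONDITION & SPEC =====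
def Spec_categorise_counts_py (counts : List (String × Int)) (out : List (String × Int)) : Prop := out = categorise_counts_py_alt counts
instance (counts : List (String × Int)) (out : List (String × Int)) : Decidable (Spec_categorise_counts_py counts out) := by unfold Spec_categorise_counts_py; infer_instance

-- ===== CLAIM =====
def Claim_equal_categorise_counts_py : Prop := ∀ (counts : List (String × Int)), Dom_categorise_counts_py counts → Spec_categorise_counts_py counts (categorise_counts_py counts)

-- ===== LEMMAS AND PROOFS =====
-- the cascade's decision as a function of the nine matcher results
def pvPick (b1 b2 b3 b4 b5 b6 b7 b8 b9 : Bool) : String :=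
  if b1 then "logistics" else if b2 then "crafting" else if b3 then "extraction"
  else if b4 then "power_distribution" else if b5 then "power_generation" else if b6 then "fluid"
  else if b7 then "storage" else if b8 then "module_distribution" else if b9 then "defense" else "other"

-- the category an entry name belongs to (shared characterisation of both programs)
def pvCatOf (name : String) : String :=
  pvPick ((pvMatcher ["transport-belt", "underground-belt", "splitter", "inserter", "loader"] []) name) ((pvMatcher ["furnace", "assembling-machine", "foundry", "chemical-plant", "oil-refinery", "recycler", "electromagnetic-plant", "biochamber", "centrifuge", "crusher"] []) name) ((pvMatcher ["mining-drill"] []) name) ((pvMatcher ["electric-pole"] ["substation"]) name) ((pvMatcher ["solar-panel", "accumulator", "steam-engine", "steam-turbine", "boiler", "nuclear-reactor", "heat-exchanger", "heat-pipe"] []) name) ((pvMatcher ["pipe", "tank", "pump"] []) name) ((pvMatcher ["chest", "container", "warehouse"] []) name) ((pvMatcher ["beacon"] []) name) ((pvMatcher ["turret", "wall", "gate"] []) name)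

-- total count of the entries of category c
def pvS (c : String) (l : List (String × Int)) : Int :=
  ((l.filter (fun e => pvCatOf e.1 == c)).map Prod.snd).sum

-- the ten categories, in the order B's stages introduce them
def pvCatsAll : List String :=
  ["logistics", "crafting", "extraction", "power_distribution", "power_generation",
   "fluid", "storage", "module_distribution", "defense", "other"]

-- conditional bulk insert: what one stage of B does to the dict
def pvCondIns (counts : List (String × Int)) (d : PySem.Dict String Int) (c : String) : PySem.Dict String Int :=
  if counts.any (fun e => pvCatOf e.1 == c) then d.insert c (pvS c counts) else d

lemma pvMask1 (b1 b2 b3 b4 b5 b6 b7 b8 b9 : Bool) :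
    b1 = (pvPick b1 b2 b3 b4 b5 b6 b7 b8 b9 == "logistics") := by
  revert b1 b2 b3 b4 b5 b6 b7 b8 b9; decide

lemma pvMask2 (b1 b2 b3 b4 b5 b6 b7 b8 b9 : Bool) :
    (b2 && !b1) = (pvPick b1 b2 b3 b4 b5 b6 b7 b8 b9 == "crafting") := by
  revert b1 b2 b3 b4 b5 b6 b7 b8 b9; decide

lemma pvMask3 (b1 b2 b3 b4 b5 b6 b7 b8 b9 : Bool) :
    (b3 && (!b2 && !b1)) = (pvPick b1 b2 b3 b4 b5 b6 b7 b8 b9 == "extraction") := by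
  revert b1 b2 b3 b4 b5 b6 b7 b8 b9; decide

lemma pvMask4 (b1 b2 b3 b4 b5 b6 b7 b8 b9 : Bool) :
    (b4 && (!b3 && (!b2 && !b1))) = (pvPick b1 b2 b3 b4 b5 b6 b7 b8 b9 == "power_distribution") := by
  revert b1 b2 b3 b4 b5 b6 b7 b8 b9; decide

lemma pvMask5 (b1 b2 b3 b4 b5 b6 b7 b8 b9 : Bool) :
    (b5 && (!b4 && (!b3 && (!b2 && !b1)))) = (pvPick b1 b2 b3 b4 b5 b6 b7 b8 b9 == "power_generation") := by
  revert b1 b2 b3 b4 b5 b6 b7 b8 b9; decide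

lemma pvMask6 (b1 b2 b3 b4 b5 b6 b7 b8 b9 : Bool) :
    (b6 && (!b5 && (!b4 && (!b3 && (!b2 && !b1))))) = (pvPick b1 b2 b3 b4 b5 b6 b7 b8 b9 == "fluid") := by
  revert b1 b2 b3 b4 b5 b6 b7 b8 b9; decide

lemma pvMask7 (b1 b2 b3 b4 b5 b6 b7 b8 b9 : Bool) :
    (b7 && (!b6 && (!b5 && (!b4 && (!b3 && (!b2 && !b1)))))) = (pvPick b1 b2 b3 b4 b5 b6 b7 b8 b9 == "storage") := by
  revert b1 b2 b3 b4 b5 b6 b7 b8 b9; decide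

lemma pvMask8 (b1 b2 b3 b4 b5 b6 b7 b8 b9 : Bool) :
    (b8 && (!b7 && (!b6 && (!b5 && (!b4 && (!b3 && (!b2 && !b1))))))) = (pvPick b1 b2 b3 b4 b5 b6 b7 b8 b9 == "module_distribution") := by
  revert b1 b2 b3 b4 b5 b6 b7 b8 b9; decide

lemma pvMask9 (b1 b2 b3 b4 b5 b6 b7 b8 b9 : Bool) :
    (b9 && (!b8 && (!b7 && (!b6 && (!b5 && (!b4 && (!b3 && (!b2 && !b1)))))))) = (pvPick b1 b2 b3 b4 b5 b6 b7 b8 b9 == "defense") := by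
  revert b1 b2 b3 b4 b5 b6 b7 b8 b9; decide

lemma pvMaskO (b1 b2 b3 b4 b5 b6 b7 b8 b9 : Bool) :
    (!b9 && (!b8 && (!b7 && (!b6 && (!b5 && (!b4 && (!b3 && (!b2 && !b1)))))))) = (pvPick b1 b2 b3 b4 b5 b6 b7 b8 b9 == "other") := by
  revert b1 b2 b3 b4 b5 b6 b7 b8 b9; decide

lemma pvStepA_eq (cats : PySem.Dict String Int) (p : String × Int) :
    pvStepA cats p = pvBumpA cats (pvCatOf p.1) p.2 := by
  obtain ⟨name, n⟩ := p
  simp only [pvStepA, pvCatOf, pvPick, pvMatcher, List.any_cons, List.any_nil, List.contains_cons,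
    List.contains_nil, Bool.or_false, Bool.or_assoc]
  split_ifs <;> rfl

-- A's dict after the fold, characterised by lookup
lemma pvFoldA_get? (l : List (String × Int)) (d : PySem.Dict String Int) (c : String) :
    (l.foldl pvStepA d).get? c =
      if l.any (fun e => pvCatOf e.1 == c) then some (d.getD c 0 + pvS c l) else d.get? c := by
  induction l generalizing d with
  | nil => simp
  | cons p t ih =>
    obtain ⟨nm, n⟩ := p
    simp only [List.foldl_cons, List.any_cons, ih, pvStepA_eq, pvBumpA]
    by_cases hc : pvCatOf nm = c
    · subst hc
      simp only [beq_self_eq_true, Bool.true_or, if_pos]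
      by_cases ht : (t.any fun e => pvCatOf e.1 == pvCatOf nm) = true
      · simp [ht, pvS, add_assoc]
      · rw [Bool.not_eq_true] at ht
        have hf : t.filter (fun e => pvCatOf e.1 == pvCatOf nm) = [] := by
          simp only [List.filter_eq_nil_iff]
          intro a ha
          simpa using List.any_eq_false.mp ht a ha
        simp [ht, pvS, hf]
    · have hne : (pvCatOf nm == c) = false := by simpa using hc
      simp only [hne, Bool.false_or, pvS, List.filter_cons]
      simp [PySem.Dict.getD_insert, PySem.Dict.get?_insert, Ne.symm hc]

lemma pvFilter_ne_nil_iff_any (l : List (String × Int)) (p : String × Int → Bool) :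
    (l.filter p ≠ []) ↔ (l.any p = true) := by
  simp [List.filter_eq_nil_iff, List.any_eq_true]

-- one stage of B, on a remainder r whose matched part is the category-c slice of l
lemma pvStageStep_eq' (d : PySem.Dict String Int) (r l : List (String × Int)) (c : String)
    (m : String → Bool)
    (hm : r.filter (fun e => m e.1) = l.filter (fun e => pvCatOf e.1 == c)) :
    pvStageStep (d, r) (c, m) = (pvCondIns l d c, r.filter (fun e => !(m e.1))) := by
  simp only [pvStageStep, hm, pvCondIns, pvS]
  rw [if_congr (pvFilter_ne_nil_iff_any l _) rfl rfl]

set_option maxHeartbeats 1000000 in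
lemma pvFoldB (counts : List (String × Int)) :
    pvStages.foldl pvStageStep (PySem.Dict.empty, counts) =
      ((pvCondIns counts (pvCondIns counts (pvCondIns counts (pvCondIns counts (pvCondIns counts (pvCondIns counts (pvCondIns counts (pvCondIns counts (pvCondIns counts PySem.Dict.empty "logistics") "crafting") "extraction") "power_distribution") "power_generation") "fluid") "storage") "module_distribution") "defense"), counts.filter (fun e => pvCatOf e.1 == "other")) := by
  have s1 : pvStageStep (PySem.Dict.empty, counts) ("logistics", (pvMatcher ["transport-belt", "underground-belt", "splitter", "inserter", "loader"] [])) =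
      (pvCondIns counts PySem.Dict.empty "logistics", (counts.filter (fun e => !((pvMatcher ["transport-belt", "underground-belt", "splitter", "inserter", "loader"] []) e.1)))) := by
    refine pvStageStep_eq' _ _ counts _ _ ?_
    exact List.filter_congr fun a _ => pvMask1 ((pvMatcher ["transport-belt", "underground-belt", "splitter", "inserter", "loader"] []) a.1) ((pvMatcher ["furnace", "assembling-machine", "foundry", "chemical-plant", "oil-refinery", "recycler", "electromagnetic-plant", "biochamber", "centrifuge", "crusher"] []) a.1) ((pvMatcher ["mining-drill"] []) a.1) ((pvMatcher ["electric-pole"] ["substation"]) a.1) ((pvMatcher ["solar-panel", "accumulator", "steam-engine", "steam-turbine", "boiler", "nuclear-reactor", "heat-exchanger", "heat-pipe"] []) a.1) ((pvMatcher ["pipe", "tank", "pump"] []) a.1) ((pvMatcher ["chest", "container", "warehouse"] []) a.1) ((pvMatcher ["beacon"] []) a.1) ((pvMatcher ["turret", "wall", "gate"] []) a.1)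
  have s2 : pvStageStep ((pvCondIns counts PySem.Dict.empty "logistics"), (counts.filter (fun e => !((pvMatcher ["transport-belt", "underground-belt", "splitter", "inserter", "loader"] []) e.1)))) ("crafting", (pvMatcher ["furnace", "assembling-machine", "foundry", "chemical-plant", "oil-refinery", "recycler", "electromagnetic-plant", "biochamber", "centrifuge", "crusher"] [])) =
      (pvCondIns counts (pvCondIns counts PySem.Dict.empty "logistics") "crafting", ((counts.filter (fun e => !((pvMatcher ["transport-belt", "underground-belt", "splitter", "inserter", "loader"] []) e.1))).filter (fun e => !((pvMatcher ["furnace", "assembling-machine", "foundry", "chemical-plant", "oil-refinery", "recycler", "electromagnetic-plant", "biochamber", "centrifuge", "crusher"] []) e.1)))) := by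
    refine pvStageStep_eq' _ _ counts _ _ ?_
    simp only [List.filter_filter]
    exact List.filter_congr fun a _ => pvMask2 ((pvMatcher ["transport-belt", "underground-belt", "splitter", "inserter", "loader"] []) a.1) ((pvMatcher ["furnace", "assembling-machine", "foundry", "chemical-plant", "oil-refinery", "recycler", "electromagnetic-plant", "biochamber", "centrifuge", "crusher"] []) a.1) ((pvMatcher ["mining-drill"] []) a.1) ((pvMatcher ["electric-pole"] ["substation"]) a.1) ((pvMatcher ["solar-panel", "accumulator", "steam-engine", "steam-turbine", "boiler", "nuclear-reactor", "heat-exchanger", "heat-pipe"] []) a.1) ((pvMatcher ["pipe", "tank", "pump"] []) a.1) ((pvMatcher ["chest", "container", "warehouse"] []) a.1) ((pvMatcher ["beacon"] []) a.1) ((pvMatcher ["turret", "wall", "gate"] []) a.1)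
  have s3 : pvStageStep ((pvCondIns counts (pvCondIns counts PySem.Dict.empty "logistics") "crafting"), ((counts.filter (fun e => !((pvMatcher ["transport-belt", "underground-belt", "splitter", "inserter", "loader"] []) e.1))).filter (fun e => !((pvMatcher ["furnace", "assembling-machine", "foundry", "chemical-plant", "oil-refinery", "recycler", "electromagnetic-plant", "biochamber", "centrifuge", "crusher"] []) e.1)))) ("extraction", (pvMatcher ["mining-drill"] [])) =
      (pvCondIns counts (pvCondIns counts (pvCondIns counts PySem.Dict.empty "logistics") "crafting") "extraction", (((counts.filter (fun e => !((pvMatcher ["transport-belt", "underground-belt", "splitter", "inserter", "loader"] []) e.1))).filter (fun e => !((pvMatcher ["furnace", "assembling-machine", "foundry", "chemical-plant", "oil-refinery", "recycler", "electromagnetic-plant", "biochamber", "centrifuge", "crusher"] []) e.1))).filter (fun e => !((pvMatcher ["mining-drill"] []) e.1)))) := by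
    refine pvStageStep_eq' _ _ counts _ _ ?_
    simp only [List.filter_filter]
    exact List.filter_congr fun a _ => pvMask3 ((pvMatcher ["transport-belt", "underground-belt", "splitter", "inserter", "loader"] []) a.1) ((pvMatcher ["furnace", "assembling-machine", "foundry", "chemical-plant", "oil-refinery", "recycler", "electromagnetic-plant", "biochamber", "centrifuge", "crusher"] []) a.1) ((pvMatcher ["mining-drill"] []) a.1) ((pvMatcher ["electric-pole"] ["substation"]) a.1) ((pvMatcher ["solar-panel", "accumulator", "steam-engine", "steam-turbine", "boiler", "nuclear-reactor", "heat-exchanger", "heat-pipe"] []) a.1) ((pvMatcher ["pipe", "tank", "pump"] []) a.1) ((pvMatcher ["chest", "container", "warehouse"] []) a.1) ((pvMatcher ["beacon"] []) a.1) ((pvMatcher ["turret", "wall", "gate"] []) a.1)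
  have s4 : pvStageStep ((pvCondIns counts (pvCondIns counts (pvCondIns counts PySem.Dict.empty "logistics") "crafting") "extraction"), (((counts.filter (fun e => !((pvMatcher ["transport-belt", "underground-belt", "splitter", "inserter", "loader"] []) e.1))).filter (fun e => !((pvMatcher ["furnace", "assembling-machine", "foundry", "chemical-plant", "oil-refinery", "recycler", "electromagnetic-plant", "biochamber", "centrifuge", "crusher"] []) e.1))).filter (fun e => !((pvMatcher ["mining-drill"] []) e.1)))) ("power_distribution", (pvMatcher ["electric-pole"] ["substation"])) =
      (pvCondIns counts (pvCondIns counts (pvCondIns counts (pvCondIns counts PySem.Dict.empty "logistics") "crafting") "extraction") "power_distribution", ((((counts.filter (fun e => !((pvMatcher ["transport-belt", "underground-belt", "splitter", "inserter", "loader"] []) e.1))).filter (fun e => !((pvMatcher ["furnace", "assembling-machine", "foundry", "chemical-plant", "oil-refinery", "recycler", "electromagnetic-plant", "biochamber", "centrifuge", "crusher"] []) e.1))).filter (fun e => !((pvMatcher ["mining-drill"] []) e.1))).filter (fun e => !((pvMatcher ["electric-pole"] ["substation"]) e.1)))) := by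
    refine pvStageStep_eq' _ _ counts _ _ ?_
    simp only [List.filter_filter]
    exact List.filter_congr fun a _ => pvMask4 ((pvMatcher ["transport-belt", "underground-belt", "splitter", "inserter", "loader"] []) a.1) ((pvMatcher ["furnace", "assembling-machine", "foundry", "chemical-plant", "oil-refinery", "recycler", "electromagnetic-plant", "biochamber", "centrifuge", "crusher"] []) a.1) ((pvMatcher ["mining-drill"] []) a.1) ((pvMatcher ["electric-pole"] ["substation"]) a.1) ((pvMatcher ["solar-panel", "accumulator", "steam-engine", "steam-turbine", "boiler", "nuclear-reactor", "heat-exchanger", "heat-pipe"] []) a.1) ((pvMatcher ["pipe", "tank", "pump"] []) a.1) ((pvMatcher ["chest", "container", "warehouse"] []) a.1) ((pvMatcher ["beacon"] []) a.1) ((pvMatcher ["turret", "wall", "gate"] []) a.1)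
  have s5 : pvStageStep ((pvCondIns counts (pvCondIns counts (pvCondIns counts (pvCondIns counts PySem.Dict.empty "logistics") "crafting") "extraction") "power_distribution"), ((((counts.filter (fun e => !((pvMatcher ["transport-belt", "underground-belt", "splitter", "inserter", "loader"] []) e.1))).filter (fun e => !((pvMatcher ["furnace", "assembling-machine", "foundry", "chemical-plant", "oil-refinery", "recycler", "electromagnetic-plant", "biochamber", "centrifuge", "crusher"] []) e.1))).filter (fun e => !((pvMatcher ["mining-drill"] []) e.1))).filter (fun e => !((pvMatcher ["electric-pole"] ["substation"]) e.1)))) ("power_generation", (pvMatcher ["solar-panel", "accumulator", "steam-engine", "steam-turbine", "boiler", "nuclear-reactor", "heat-exchanger", "heat-pipe"] [])) =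
      (pvCondIns counts (pvCondIns counts (pvCondIns counts (pvCondIns counts (pvCondIns counts PySem.Dict.empty "logistics") "crafting") "extraction") "power_distribution") "power_generation", (((((counts.filter (fun e => !((pvMatcher ["transport-belt", "underground-belt", "splitter", "inserter", "loader"] []) e.1))).filter (fun e => !((pvMatcher ["furnace", "assembling-machine", "foundry", "chemical-plant", "oil-refinery", "recycler", "electromagnetic-plant", "biochamber", "centrifuge", "crusher"] []) e.1))).filter (fun e => !((pvMatcher ["mining-drill"] []) e.1))).filter (fun e => !((pvMatcher ["electric-pole"] ["substation"]) e.1))).filter (fun e => !((pvMatcher ["solar-panel", "accumulator", "steam-engine", "steam-turbine", "boiler", "nuclear-reactor", "heat-exchanger", "heat-pipe"] []) e.1)))) := by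
    refine pvStageStep_eq' _ _ counts _ _ ?_
    simp only [List.filter_filter]
    exact List.filter_congr fun a _ => pvMask5 ((pvMatcher ["transport-belt", "underground-belt", "splitter", "inserter", "loader"] []) a.1) ((pvMatcher ["furnace", "assembling-machine", "foundry", "chemical-plant", "oil-refinery", "recycler", "electromagnetic-plant", "biochamber", "centrifuge", "crusher"] []) a.1) ((pvMatcher ["mining-drill"] []) a.1) ((pvMatcher ["electric-pole"] ["substation"]) a.1) ((pvMatcher ["solar-panel", "accumulator", "steam-engine", "steam-turbine", "boiler", "nuclear-reactor", "heat-exchanger", "heat-pipe"] []) a.1) ((pvMatcher ["pipe", "tank", "pump"] []) a.1) ((pvMatcher ["chest", "container", "warehouse"] []) a.1) ((pvMatcher ["beacon"] []) a.1) ((pvMatcher ["turret", "wall", "gate"] []) a.1)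
  have s6 : pvStageStep ((pvCondIns counts (pvCondIns counts (pvCondIns counts (pvCondIns counts (pvCondIns counts PySem.Dict.empty "logistics") "crafting") "extraction") "power_distribution") "power_generation"), (((((counts.filter (fun e => !((pvMatcher ["transport-belt", "underground-belt", "splitter", "inserter", "loader"] []) e.1))).filter (fun e => !((pvMatcher ["furnace", "assembling-machine", "foundry", "chemical-plant", "oil-refinery", "recycler", "electromagnetic-plant", "biochamber", "centrifuge", "crusher"] []) e.1))).filter (fun e => !((pvMatcher ["mining-drill"] []) e.1))).filter (fun e => !((pvMatcher ["electric-pole"] ["substation"]) e.1))).filter (fun e => !((pvMatcher ["solar-panel", "accumulator", "steam-engine", "steam-turbine", "boiler", "nuclear-reactor", "heat-exchanger", "heat-pipe"] []) e.1)))) ("fluid", (pvMatcher ["pipe", "tank", "pump"] [])) =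
      (pvCondIns counts (pvCondIns counts (pvCondIns counts (pvCondIns counts (pvCondIns counts (pvCondIns counts PySem.Dict.empty "logistics") "crafting") "extraction") "power_distribution") "power_generation") "fluid", ((((((counts.filter (fun e => !((pvMatcher ["transport-belt", "underground-belt", "splitter", "inserter", "loader"] []) e.1))).filter (fun e => !((pvMatcher ["furnace", "assembling-machine", "foundry", "chemical-plant", "oil-refinery", "recycler", "electromagnetic-plant", "biochamber", "centrifuge", "crusher"] []) e.1))).filter (fun e => !((pvMatcher ["mining-drill"] []) e.1))).filter (fun e => !((pvMatcher ["electric-pole"] ["substation"]) e.1))).filter (fun e => !((pvMatcher ["solar-panel", "accumulator", "steam-engine", "steam-turbine", "boiler", "nuclear-reactor", "heat-exchanger", "heat-pipe"] []) e.1))).filter (fun e => !((pvMatcher ["pipe", "tank", "pump"] []) e.1)))) := by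
    refine pvStageStep_eq' _ _ counts _ _ ?_
    simp only [List.filter_filter]
    exact List.filter_congr fun a _ => pvMask6 ((pvMatcher ["transport-belt", "underground-belt", "splitter", "inserter", "loader"] []) a.1) ((pvMatcher ["furnace", "assembling-machine", "foundry", "chemical-plant", "oil-refinery", "recycler", "electromagnetic-plant", "biochamber", "centrifuge", "crusher"] []) a.1) ((pvMatcher ["mining-drill"] []) a.1) ((pvMatcher ["electric-pole"] ["substation"]) a.1) ((pvMatcher ["solar-panel", "accumulator", "steam-engine", "steam-turbine", "boiler", "nuclear-reactor", "heat-exchanger", "heat-pipe"] []) a.1) ((pvMatcher ["pipe", "tank", "pump"] []) a.1) ((pvMatcher ["chest", "container", "warehouse"] []) a.1) ((pvMatcher ["beacon"] []) a.1) ((pvMatcher ["turret", "wall", "gate"] []) a.1)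
  have s7 : pvStageStep ((pvCondIns counts (pvCondIns counts (pvCondIns counts (pvCondIns counts (pvCondIns counts (pvCondIns counts PySem.Dict.empty "logistics") "crafting") "extraction") "power_distribution") "power_generation") "fluid"), ((((((counts.filter (fun e => !((pvMatcher ["transport-belt", "underground-belt", "splitter", "inserter", "loader"] []) e.1))).filter (fun e => !((pvMatcher ["furnace", "assembling-machine", "foundry", "chemical-plant", "oil-refinery", "recycler", "electromagnetic-plant", "biochamber", "centrifuge", "crusher"] []) e.1))).filter (fun e => !((pvMatcher ["mining-drill"] []) e.1))).filter (fun e => !((pvMatcher ["electric-pole"] ["substation"]) e.1))).filter (fun e => !((pvMatcher ["solar-panel", "accumulator", "steam-engine", "steam-turbine", "boiler", "nuclear-reactor", "heat-exchanger", "heat-pipe"] []) e.1))).filter (fun e => !((pvMatcher ["pipe", "tank", "pump"] []) e.1)))) ("storage", (pvMatcher ["chest", "container", "warehouse"] [])) =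
      (pvCondIns counts (pvCondIns counts (pvCondIns counts (pvCondIns counts (pvCondIns counts (pvCondIns counts (pvCondIns counts PySem.Dict.empty "logistics") "crafting") "extraction") "power_distribution") "power_generation") "fluid") "storage", (((((((counts.filter (fun e => !((pvMatcher ["transport-belt", "underground-belt", "splitter", "inserter", "loader"] []) e.1))).filter (fun e => !((pvMatcher ["furnace", "assembling-machine", "foundry", "chemical-plant", "oil-refinery", "recycler", "electromagnetic-plant", "biochamber", "centrifuge", "crusher"] []) e.1))).filter (fun e => !((pvMatcher ["mining-drill"] []) e.1))).filter (fun e => !((pvMatcher ["electric-pole"] ["substation"]) e.1))).filter (fun e => !((pvMatcher ["solar-panel", "accumulator", "steam-engine", "steam-turbine", "boiler", "nuclear-reactor", "heat-exchanger", "heat-pipe"] []) e.1))).filter (fun e => !((pvMatcher ["pipe", "tank", "pump"] []) e.1))).filter (fun e => !((pvMatcher ["chest", "container", "warehouse"] []) e.1)))) := by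
    refine pvStageStep_eq' _ _ counts _ _ ?_
    simp only [List.filter_filter]
    exact List.filter_congr fun a _ => pvMask7 ((pvMatcher ["transport-belt", "underground-belt", "splitter", "inserter", "loader"] []) a.1) ((pvMatcher ["furnace", "assembling-machine", "foundry", "chemical-plant", "oil-refinery", "recycler", "electromagnetic-plant", "biochamber", "centrifuge", "crusher"] []) a.1) ((pvMatcher ["mining-drill"] []) a.1) ((pvMatcher ["electric-pole"] ["substation"]) a.1) ((pvMatcher ["solar-panel", "accumulator", "steam-engine", "steam-turbine", "boiler", "nuclear-reactor", "heat-exchanger", "heat-pipe"] []) a.1) ((pvMatcher ["pipe", "tank", "pump"] []) a.1) ((pvMatcher ["chest", "container", "warehouse"] []) a.1) ((pvMatcher ["beacon"] []) a.1) ((pvMatcher ["turret", "wall", "gate"] []) a.1)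
  have s8 : pvStageStep ((pvCondIns counts (pvCondIns counts (pvCondIns counts (pvCondIns counts (pvCondIns counts (pvCondIns counts (pvCondIns counts PySem.Dict.empty "logistics") "crafting") "extraction") "power_distribution") "power_generation") "fluid") "storage"), (((((((counts.filter (fun e => !((pvMatcher ["transport-belt", "underground-belt", "splitter", "inserter", "loader"] []) e.1))).filter (fun e => !((pvMatcher ["furnace", "assembling-machine", "foundry", "chemical-plant", "oil-refinery", "recycler", "electromagnetic-plant", "biochamber", "centrifuge", "crusher"] []) e.1))).filter (fun e => !((pvMatcher ["mining-drill"] []) e.1))).filter (fun e => !((pvMatcher ["electric-pole"] ["substation"]) e.1))).filter (fun e => !((pvMatcher ["solar-panel", "accumulator", "steam-engine", "steam-turbine", "boiler", "nuclear-reactor", "heat-exchanger", "heat-pipe"] []) e.1))).filter (fun e => !((pvMatcher ["pipe", "tank", "pump"] []) e.1))).filter (fun e => !((pvMatcher ["chest", "container", "warehouse"] []) e.1)))) ("module_distribution", (pvMatcher ["beacon"] [])) =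
      (pvCondIns counts (pvCondIns counts (pvCondIns counts (pvCondIns counts (pvCondIns counts (pvCondIns counts (pvCondIns counts (pvCondIns counts PySem.Dict.empty "logistics") "crafting") "extraction") "power_distribution") "power_generation") "fluid") "storage") "module_distribution", ((((((((counts.filter (fun e => !((pvMatcher ["transport-belt", "underground-belt", "splitter", "inserter", "loader"] []) e.1))).filter (fun e => !((pvMatcher ["furnace", "assembling-machine", "foundry", "chemical-plant", "oil-refinery", "recycler", "electromagnetic-plant", "biochamber", "centrifuge", "crusher"] []) e.1))).filter (fun e => !((pvMatcher ["mining-drill"] []) e.1))).filter (fun e => !((pvMatcher ["electric-pole"] ["substation"]) e.1))).filter (fun e => !((pvMatcher ["solar-panel", "accumulator", "steam-engine", "steam-turbine", "boiler", "nuclear-reactor", "heat-exchanger", "heat-pipe"] []) e.1))).filter (fun e => !((pvMatcher ["pipe", "tank", "pump"] []) e.1))).filter (fun e => !((pvMatcher ["chest", "container", "warehouse"] []) e.1))).filter (fun e => !((pvMatcher ["beacon"] []) e.1)))) := by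
    refine pvStageStep_eq' _ _ counts _ _ ?_
    simp only [List.filter_filter]
    exact List.filter_congr fun a _ => pvMask8 ((pvMatcher ["transport-belt", "underground-belt", "splitter", "inserter", "loader"] []) a.1) ((pvMatcher ["furnace", "assembling-machine", "foundry", "chemical-plant", "oil-refinery", "recycler", "electromagnetic-plant", "biochamber", "centrifuge", "crusher"] []) a.1) ((pvMatcher ["mining-drill"] []) a.1) ((pvMatcher ["electric-pole"] ["substation"]) a.1) ((pvMatcher ["solar-panel", "accumulator", "steam-engine", "steam-turbine", "boiler", "nuclear-reactor", "heat-exchanger", "heat-pipe"] []) a.1) ((pvMatcher ["pipe", "tank", "pump"] []) a.1) ((pvMatcher ["chest", "container", "warehouse"] []) a.1) ((pvMatcher ["beacon"] []) a.1) ((pvMatcher ["turret", "wall", "gate"] []) a.1)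
  have s9 : pvStageStep ((pvCondIns counts (pvCondIns counts (pvCondIns counts (pvCondIns counts (pvCondIns counts (pvCondIns counts (pvCondIns counts (pvCondIns counts PySem.Dict.empty "logistics") "crafting") "extraction") "power_distribution") "power_generation") "fluid") "storage") "module_distribution"), ((((((((counts.filter (fun e => !((pvMatcher ["transport-belt", "underground-belt", "splitter", "inserter", "loader"] []) e.1))).filter (fun e => !((pvMatcher ["furnace", "assembling-machine", "foundry", "chemical-plant", "oil-refinery", "recycler", "electromagnetic-plant", "biochamber", "centrifuge", "crusher"] []) e.1))).filter (fun e => !((pvMatcher ["mining-drill"] []) e.1))).filter (fun e => !((pvMatcher ["electric-pole"] ["substation"]) e.1))).filter (fun e => !((pvMatcher ["solar-panel", "accumulator", "steam-engine", "steam-turbine", "boiler", "nuclear-reactor", "heat-exchanger", "heat-pipe"] []) e.1))).filter (fun e => !((pvMatcher ["pipe", "tank", "pump"] []) e.1))).filter (fun e => !((pvMatcher ["chest", "container", "warehouse"] []) e.1))).filter (fun e => !((pvMatcher ["beacon"] []) e.1)))) ("defense", (pvMatcher ["turret", "wall", "gate"] [])) =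
      (pvCondIns counts (pvCondIns counts (pvCondIns counts (pvCondIns counts (pvCondIns counts (pvCondIns counts (pvCondIns counts (pvCondIns counts (pvCondIns counts PySem.Dict.empty "logistics") "crafting") "extraction") "power_distribution") "power_generation") "fluid") "storage") "module_distribution") "defense", (((((((((counts.filter (fun e => !((pvMatcher ["transport-belt", "underground-belt", "splitter", "inserter", "loader"] []) e.1))).filter (fun e => !((pvMatcher ["furnace", "assembling-machine", "foundry", "chemical-plant", "oil-refinery", "recycler", "electromagnetic-plant", "biochamber", "centrifuge", "crusher"] []) e.1))).filter (fun e => !((pvMatcher ["mining-drill"] []) e.1))).filter (fun e => !((pvMatcher ["electric-pole"] ["substation"]) e.1))).filter (fun e => !((pvMatcher ["solar-panel", "accumulator", "steam-engine", "steam-turbine", "boiler", "nuclear-reactor", "heat-exchanger", "heat-pipe"] []) e.1))).filter (fun e => !((pvMatcher ["pipe", "tank", "pump"] []) e.1))).filter (fun e => !((pvMatcher ["chest", "container", "warehouse"] []) e.1))).filter (fun e => !((pvMatcher ["beacon"] []) e.1))).filter (fun e => !((pvMatcher ["turret", "wall", "gate"] []) e.1)))) := by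
    refine pvStageStep_eq' _ _ counts _ _ ?_
    simp only [List.filter_filter]
    exact List.filter_congr fun a _ => pvMask9 ((pvMatcher ["transport-belt", "underground-belt", "splitter", "inserter", "loader"] []) a.1) ((pvMatcher ["furnace", "assembling-machine", "foundry", "chemical-plant", "oil-refinery", "recycler", "electromagnetic-plant", "biochamber", "centrifuge", "crusher"] []) a.1) ((pvMatcher ["mining-drill"] []) a.1) ((pvMatcher ["electric-pole"] ["substation"]) a.1) ((pvMatcher ["solar-panel", "accumulator", "steam-engine", "steam-turbine", "boiler", "nuclear-reactor", "heat-exchanger", "heat-pipe"] []) a.1) ((pvMatcher ["pipe", "tank", "pump"] []) a.1) ((pvMatcher ["chest", "container", "warehouse"] []) a.1) ((pvMatcher ["beacon"] []) a.1) ((pvMatcher ["turret", "wall", "gate"] []) a.1)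
  simp only [pvStages, List.foldl_cons, List.foldl_nil, s1, s2, s3, s4, s5, s6, s7, s8, s9]
  refine Prod.ext rfl ?_
  simp only [List.filter_filter]
  exact List.filter_congr fun a _ => pvMaskO ((pvMatcher ["transport-belt", "underground-belt", "splitter", "inserter", "loader"] []) a.1) ((pvMatcher ["furnace", "assembling-machine", "foundry", "chemical-plant", "oil-refinery", "recycler", "electromagnetic-plant", "biochamber", "centrifuge", "crusher"] []) a.1) ((pvMatcher ["mining-drill"] []) a.1) ((pvMatcher ["electric-pole"] ["substation"]) a.1) ((pvMatcher ["solar-panel", "accumulator", "steam-engine", "steam-turbine", "boiler", "nuclear-reactor", "heat-exchanger", "heat-pipe"] []) a.1) ((pvMatcher ["pipe", "tank", "pump"] []) a.1) ((pvMatcher ["chest", "container", "warehouse"] []) a.1) ((pvMatcher ["beacon"] []) a.1) ((pvMatcher ["turret", "wall", "gate"] []) a.1)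

lemma pvGet?_pvCondIns (counts : List (String × Int)) (d : PySem.Dict String Int) (c x : String) :
    (pvCondIns counts d c).get? x =
      if x = c ∧ (counts.any fun e => pvCatOf e.1 == c) = true then some (pvS c counts) else d.get? x := by
  unfold pvCondIns
  by_cases hx : x = c <;> by_cases ha : (counts.any fun e => pvCatOf e.1 == c) = true <;>
    simp [hx, ha, PySem.Dict.get?_insert]

lemma pvChain_get?_not_mem (counts : List (String × Int)) (cs : List String)
    (d : PySem.Dict String Int) (c : String) (hc : c ∉ cs) :
    (cs.foldl (fun d c' => pvCondIns counts d c') d).get? c = d.get? c := by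
  induction cs generalizing d with
  | nil => rfl
  | cons x t ih =>
    simp only [List.foldl_cons]
    rw [ih _ (fun h => hc (List.mem_cons_of_mem x h)), pvGet?_pvCondIns]
    have : c ≠ x := fun h => hc (h ▸ List.mem_cons_self)
    simp [this]

lemma pvChain_get?_mem (counts : List (String × Int)) (cs : List String)
    (d : PySem.Dict String Int) (c : String) (hc : c ∈ cs) (hnd : cs.Nodup) :
    (cs.foldl (fun d c' => pvCondIns counts d c') d).get? c =
      if (counts.any fun e => pvCatOf e.1 == c) = true then some (pvS c counts) else d.get? c := by
  induction cs generalizing d with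
  | nil => cases hc
  | cons x t ih =>
    simp only [List.foldl_cons]
    rcases List.mem_cons.mp hc with h | h
    · subst h
      rw [pvChain_get?_not_mem counts t _ c (List.nodup_cons.mp hnd).1, pvGet?_pvCondIns]
      by_cases ha : (counts.any fun e => pvCatOf e.1 == c) = true <;> simp [ha]
    · rw [ih _ h (List.nodup_cons.mp hnd).2]
      have hne : c ≠ x := fun h' => (List.nodup_cons.mp hnd).1 (h' ▸ h)
      rw [pvGet?_pvCondIns]
      simp [hne]

lemma pvCatOf_mem (name : String) : pvCatOf name ∈ pvCatsAll := by
  unfold pvCatOf pvPick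
  split_ifs <;> simp [pvCatsAll]

lemma pvChain_nodup (counts : List (String × Int)) (cs : List String)
    (d : PySem.Dict String Int) (h : d.keys.Nodup) :
    (cs.foldl (fun d c' => pvCondIns counts d c') d).keys.Nodup := by
  have hstep : ∀ (d' : PySem.Dict String Int) (c' : String), d'.keys.Nodup →
      (pvCondIns counts d' c').keys.Nodup := by
    intro d' c' hd
    unfold pvCondIns
    split_ifs
    · exact PySem.Dict.nodup_keys_insert _ _ _ hd
    · exact hd
  induction cs generalizing d with
  | nil => exact h
  | cons x t ih =>
    exact ih _ (hstep d x h)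

-- B's final dict is the conditional-insert chain over all ten categories
lemma pvAltDict (counts : List (String × Int)) :
    (if (counts.filter (fun e => pvCatOf e.1 == "other")) ≠ [] then
        ((pvCondIns counts (pvCondIns counts (pvCondIns counts (pvCondIns counts (pvCondIns counts (pvCondIns counts (pvCondIns counts (pvCondIns counts (pvCondIns counts PySem.Dict.empty "logistics") "crafting") "extraction") "power_distribution") "power_generation") "fluid") "storage") "module_distribution") "defense")).insert "other" (((counts.filter (fun e => pvCatOf e.1 == "other")).map Prod.snd).sum)
      else (pvCondIns counts (pvCondIns counts (pvCondIns counts (pvCondIns counts (pvCondIns counts (pvCondIns counts (pvCondIns counts (pvCondIns counts (pvCondIns counts PySem.Dict.empty "logistics") "crafting") "extraction") "power_distribution") "power_generation") "fluid") "storage") "module_distribution") "defense"))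
    = pvCatsAll.foldl (fun d c' => pvCondIns counts d c') PySem.Dict.empty := by
  simp only [pvCatsAll, List.foldl_cons, List.foldl_nil]
  conv_rhs => rw [pvCondIns]
  rw [if_congr (pvFilter_ne_nil_iff_any counts _) rfl rfl]
  rfl

-- A's dict keys are unique
lemma pvANodup (counts : List (String × Int)) :
    (counts.foldl pvStepA PySem.Dict.empty).keys.Nodup := by
  have hfun : counts.foldl pvStepA PySem.Dict.empty =
      counts.foldl (fun d p => d.insert (pvCatOf p.1) (d.getD (pvCatOf p.1) 0 + p.2)) PySem.Dict.empty :=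
    PySem.List.foldl_congr_mem _ _ _ _ (fun b a _ => pvStepA_eq b a)
  rw [hfun]
  exact PySem.Dict.nodup_keys_foldl_insert_key counts (fun p => pvCatOf p.1)
    (fun d p => d.getD (pvCatOf p.1) 0 + p.2) PySem.Dict.empty PySem.Dict.nodup_keys_empty

-- the two dicts agree on every lookup
lemma pvGet?_agree (counts : List (String × Int)) (c : String) :
    (counts.foldl pvStepA PySem.Dict.empty).get? c =
      (pvCatsAll.foldl (fun d c' => pvCondIns counts d c') PySem.Dict.empty).get? c := by
  rw [pvFoldA_get?]
  by_cases hc : c ∈ pvCatsAll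
  · rw [pvChain_get?_mem counts pvCatsAll _ c hc (by decide)]
    by_cases ha : (counts.any fun e => pvCatOf e.1 == c) = true <;> simp [ha]
  · rw [pvChain_get?_not_mem counts pvCatsAll _ c hc]
    have ha : (counts.any fun e => pvCatOf e.1 == c) = false := by
      rw [List.any_eq_false]
      intro e he
      simp only [Bool.not_eq_true, beq_eq_false_iff_ne, ne_eq]
      intro h
      exact hc (h ▸ pvCatOf_mem e.1)
    simp [ha]

-- hence their items lists are permutations of one another
lemma pvItems_perm (counts : List (String × Int)) :
    (counts.foldl pvStepA PySem.Dict.empty).items.Perm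
      ((pvCatsAll.foldl (fun d c' => pvCondIns counts d c') PySem.Dict.empty).items) := by
  have hA := pvANodup counts
  have hB := pvChain_nodup counts pvCatsAll PySem.Dict.empty PySem.Dict.nodup_keys_empty
  refine (List.perm_ext_iff_of_nodup (hA.of_map _) (hB.of_map _)).mpr ?_
  intro ⟨k, v⟩
  rw [← PySem.Dict.get?_eq_some_iff_mem_items _ k v hA,
      ← PySem.Dict.get?_eq_some_iff_mem_items _ k v hB, pvGet?_agree]

-- ===== VERDICT =====
theorem categorise_counts_py_spec : Claim_equal_categorise_counts_py := by
  intro counts _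
  unfold Spec_categorise_counts_py categorise_counts_py categorise_counts_py_alt
  simp only [pvFoldB counts]
  rw [pvAltDict counts]
  have hs : PySem.List.sorted (counts.foldl pvStepA PySem.Dict.empty).items
        (fun p => toLex (p.1.toList, p.2)) false =
      PySem.List.sorted ((pvCatsAll.foldl (fun d c' => pvCondIns counts d c') PySem.Dict.empty).items)
        (fun p => toLex (p.1.toList, p.2)) false := by
    apply PySem.List.sorted_eq_sorted_of_perm _ _ _ ?_ (pvItems_perm counts)
    intro a b h
    simp only [toLex_inj, Prod.mk.injEq] at h
    exact Prod.ext (String.toList_inj.mp h.1) h.2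
  rw [hs]
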